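-- pv_equiv track=rewrite | github.com/kit-ps/Sampling-and-Suppression-in-DP-USENIX-26 | Clustering-DPLloyd/DPLloyd.py | GenerateClusters
-- ===== SOURCE A (Python) =====
-- def GenerateClusters(database,centroids):
--     cols = list(range(len(database[0])))
--     number_clusters=len(centroids)
--
--     clusters_list = [ [] for i in range(number_clusters)]
--     for record in database:
--         closest_centroid = clusters_list[0]
--         closest_centroid_distance = 0
--         for col in cols:
--             closest_centroid_distance += (record[col] - centroids[0][col]) ** 2
--         for cluster, centroid in zip(clusters_list[1:], centroids[1:]):
--             distance = 0
--             for col in cols: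
--                 distance += (record[col] - centroid[col]) ** 2
--             if distance < closest_centroid_distance:
--                 closest_centroid = cluster
--                 closest_centroid_distance = distance
--
--         #Append elemenet to cluster c
--         closest_centroid.append(record)
--
--     return clusters_list
-- ===== SOURCE B (Python) =====
-- def GenerateClusters(database, centroids):
--     dim = len(database[0])
--     labels = [min(range(len(centroids)),
--                   key=lambda j: sum((record[i] - centroids[j][i]) ** 2 for i in range(dim)))
--               for record in database]
--     return [[record for record, lab in zip(database, labels) if lab == j]
--             for j in range(len(centroids))]
-- ===== Notes on version B (the rewrite author's own statement) =====
-- stated objective: simpler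
-- what changed: Replaces A's hand-rolled running-minimum loop over mutable cluster references with two comprehensions: compute each record's label via min(range(k), key=squared-distance) (first-wins like A's strict <), then build each cluster by filtering the database per label.
import Mathlib
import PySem

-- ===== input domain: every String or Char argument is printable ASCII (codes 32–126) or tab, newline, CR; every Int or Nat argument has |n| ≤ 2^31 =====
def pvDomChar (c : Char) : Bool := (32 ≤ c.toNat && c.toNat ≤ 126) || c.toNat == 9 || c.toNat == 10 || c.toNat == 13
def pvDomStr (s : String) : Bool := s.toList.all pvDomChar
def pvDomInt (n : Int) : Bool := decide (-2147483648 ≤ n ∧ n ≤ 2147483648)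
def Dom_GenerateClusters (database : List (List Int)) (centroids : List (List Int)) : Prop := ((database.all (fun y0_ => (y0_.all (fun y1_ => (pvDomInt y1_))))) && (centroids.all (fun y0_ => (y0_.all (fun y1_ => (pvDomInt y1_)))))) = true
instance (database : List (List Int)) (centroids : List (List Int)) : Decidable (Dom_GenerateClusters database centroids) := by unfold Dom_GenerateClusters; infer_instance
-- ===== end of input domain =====

-- B re-decomposes A: it first computes each record's label via min(range(k), key=…)
-- (objective: simpler — two small comprehensions instead of a hand-rolled running-minimum
-- loop with mutable cluster references), then builds each cluster by filtering; same
-- return value. A mutates nothing observable; equivalence is about the return value.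

-- ===== PORT A =====
-- inner loop 'for col in cols: distance += (record[col] - centroid[col]) ** 2'
-- (pyGetD's default 0 is unreachable under Pre_: all indices are in range there)
def pvSqA (cols : List Int) (record : List Int) (centroid : List Int) : Int :=
  cols.foldl (fun acc col =>
    acc + (PySem.List.pyGetD record col 0 - PySem.List.pyGetD centroid col 0) ^ 2) 0

-- A's 'closest_centroid' is a REFERENCE to one of the anonymous lists in clusters_list;
-- it is represented by its index (the zip over clusters_list[1:]/centroids[1:] pairs the
-- cluster at index i+1 with centroids[i+1], supplied here by zipIdx); the final
-- 'closest_centroid.append(record)' becomes a set at that index.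
def GenerateClusters (database : List (List Int)) (centroids : List (List Int)) : List (List (List Int)) :=
  let cols := PySem.List.pyRange 0 ((PySem.List.pyGetD database 0 []).length : Int) 1
  let numberClusters := centroids.length
  let init : List (List (List Int)) := (List.range numberClusters).map (fun _ => [])
  database.foldl (fun clustersList record =>
    let st0 : Nat × Int := (0, pvSqA cols record (PySem.List.pyGetD centroids 0 []))
    let best := ((centroids.drop 1).zipIdx).foldl (fun (st : Nat × Int) ci =>
      let dist := pvSqA cols record ci.1
      if dist < st.2 then (ci.2 + 1, dist) else st) st0
    clustersList.set best.1 (clustersList.getD best.1 [] ++ [record])) init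

-- ===== PORT B =====
-- 'sum((record[i] - centroids[j][i]) ** 2 for i in range(dim))'
def pvSqB (dim : Int) (record : List Int) (centroid : List Int) : Int :=
  ((PySem.List.pyRange 0 dim 1).map (fun i =>
    (PySem.List.pyGetD record i 0 - PySem.List.pyGetD centroid i 0) ^ 2)).sum

-- labels via min(range(len(centroids)), key=…) (first minimal index, Python-exact via
-- PySem.List.min?; min raises on an empty range, excluded by Pre_, so .getD 0 is unreachable);
-- then one filtering comprehension per cluster index.
def GenerateClusters_alt (database : List (List Int)) (centroids : List (List Int)) : List (List (List Int)) :=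
  let dim : Int := ((PySem.List.pyGetD database 0 []).length : Int)
  let labels := database.map (fun record =>
    (PySem.List.min? (PySem.List.pyRange 0 (centroids.length : Int) 1)
      (fun j => pvSqB dim record (PySem.List.pyGetD centroids j []))).getD 0)
  (PySem.List.pyRange 0 (centroids.length : Int) 1).map (fun j =>
    (database.zip labels).filterMap (fun rl => if rl.2 == j then some rl.1 else none))

-- ===== PRECONDITION & SPEC =====
-- Pre_ = exactly where Python's A returns normally: database[0] must exist (else IndexError),
-- centroids[0] must exist, and every record and centroid must have at least len(database[0])
-- entries (else record[col]/centroid[col] raises IndexError).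
def Pre_GenerateClusters (database : List (List Int)) (centroids : List (List Int)) : Prop :=
  database ≠ [] ∧ centroids ≠ [] ∧
  (∀ r ∈ database, (database.headD []).length ≤ r.length) ∧
  (∀ c ∈ centroids, (database.headD []).length ≤ c.length)
instance (database : List (List Int)) (centroids : List (List Int)) : Decidable (Pre_GenerateClusters database centroids) := by unfold Pre_GenerateClusters; infer_instance

def pvWitness_GenerateClusters : List (List Int) × List (List Int) := ([[0, 1], [2, 3]], [[0, 0], [2, 2]])

def Spec_GenerateClusters (database : List (List Int)) (centroids : List (List Int)) (out : List (List (List Int))) : Prop := out = GenerateClusters_alt database centroids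
instance (database : List (List Int)) (centroids : List (List Int)) (out : List (List (List Int))) : Decidable (Spec_GenerateClusters database centroids out) := by unfold Spec_GenerateClusters; infer_instance

-- ===== CLAIM (what is proved, stated in full; the proofs are below) =====
def Claim_equal_GenerateClusters : Prop := ∀ (database : List (List Int)) (centroids : List (List Int)), Dom_GenerateClusters database centroids → Pre_GenerateClusters database centroids → Spec_GenerateClusters database centroids (GenerateClusters database centroids)

-- ===== LEMMAS AND PROOFS =====

-- the two squared-distance computations agree (same pyGetD accesses, same defaults)
theorem pvSq_eq (d : Nat) (r c : List Int) :
    pvSqA (PySem.List.pyRange 0 (d : Int) 1) r c = pvSqB (d : Int) r c := by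
  simp [pvSqA, pvSqB, PySem.List.pyRange_zero_natCast, List.foldl_map, List.sum_eq_foldl]

-- min? on a nonempty list is the plain first-wins running-minimum fold
theorem min?_cons {α κ : Type} [LT κ] [DecidableLT κ] (key : α → κ) :
    ∀ (t : List α) (x : α),
      PySem.List.min? (x :: t) key = some (t.foldl (fun a y => if key y < key a then y else a) x) := by
  intro t
  induction t with
  | nil => intro x; rfl
  | cons y t ih =>
    intro x
    have h1 : PySem.List.min? (x :: y :: t) key
        = PySem.List.min? ((if key y < key x then y else x) :: t) key := by
      unfold PySem.List.min?
      by_cases h : key y < key x <;> simp [h]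
    rw [h1, ih]
    simp only [List.foldl_cons]

-- bridge: A's (index, distance) running minimum over zipIdx equals the index-only
-- first-wins fold over the corresponding integer range, when g reads the same values f does
theorem pvBridge (g : List Int → Int) (f : Int → Int) :
    ∀ (t : List (List Int)) (n b : Nat),
      (∀ i, i < t.length → g (t.getD i []) = f ((n : Int) + 1 + (i : Int))) →
      (t.zipIdx n).foldl
          (fun (st : Nat × Int) ci => if g ci.1 < st.2 then (ci.2 + 1, g ci.1) else st)
          (b, f (b : Int))
        = ((((PySem.List.pyRange ((n : Int) + 1) ((n : Int) + 1 + (t.length : Int)) 1).foldl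
              (fun a j => if f j < f a then j else a) (b : Int)).toNat),
           f ((PySem.List.pyRange ((n : Int) + 1) ((n : Int) + 1 + (t.length : Int)) 1).foldl
              (fun a j => if f j < f a then j else a) (b : Int))) := by
  intro t
  induction t with
  | nil =>
    intro n b _
    simp [PySem.List.pyRange_one_eq_nil (le_refl ((n : Int) + 1))]
  | cons x t ih =>
    intro n b H
    have hx : g x = f ((n : Int) + 1) := by
      have := H 0 (by simp)
      simpa using this
    have hcons : PySem.List.pyRange ((n : Int) + 1) ((n : Int) + 1 + ((x :: t).length : Int)) 1
        = ((n : Int) + 1) :: PySem.List.pyRange ((n : Int) + 1 + 1) ((n : Int) + 1 + ((x :: t).length : Int)) 1 := by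
      apply PySem.List.pyRange_one_cons
      simp only [List.length_cons]
      push_cast
      omega
    rw [List.zipIdx_cons, hcons]
    simp only [List.foldl_cons, hx]
    have hH' : ∀ i, i < t.length → g (t.getD i []) = f (((n + 1 : Nat) : Int) + 1 + (i : Int)) := by
      intro i hi
      have := H (i + 1) (by simp; omega)
      simp only [List.getD_cons_succ] at this
      rw [this]; push_cast; ring_nf
    have hub : ((n : Int) + 1 + 1 + (t.length : Int)) = ((n : Int) + 1 + ((x :: t).length : Int)) := by
      push_cast [List.length_cons]; ring
    by_cases h : f ((n : Int) + 1) < f ((b : Int))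
    · simp only [h, if_pos]
      have := ih (n + 1) (n + 1) hH'
      have harg : ((n + 1 : Nat) : Int) = (n : Int) + 1 := by push_cast; ring
      rw [harg, hub] at this
      rw [this]
    · simp only [h, if_neg, not_false_iff]
      have := ih (n + 1) b hH'
      have harg : ((n + 1 : Nat) : Int) = (n : Int) + 1 := by push_cast; ring
      rw [harg, hub] at this
      rw [this]

-- grouping: appending each element to the bucket picked by L equals per-bucket filtering
theorem pvGroup {α : Type} (k : Nat) (L : α → Nat) :
    ∀ (db : List α),
      db.foldl (fun cl r => cl.set (L r) (cl.getD (L r) [] ++ [r]))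
          ((List.range k).map (fun _ => ([] : List α)))
      = (List.range k).map (fun j => db.filter (fun r => L r == j)) := by
  intro db
  induction db using List.reverseRecOn with
  | nil => simp
  | append_singleton db r ih =>
    rw [List.foldl_append, ih]
    simp only [List.foldl_cons, List.foldl_nil]
    by_cases hk : L r < k
    · apply List.ext_getElem
      · simp
      · intro i hi₁ hi₂
        simp only [List.length_set, List.length_map, List.length_range] at hi₁
        rw [List.getElem_set]
        have hgd := PySem.List.getD_map_range (fun j => db.filter (fun r => L r == j)) k (L r) [] hk
        simp only [hgd]
        simp only [List.getElem_map, List.getElem_range, List.filter_append]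
        by_cases hir : i = L r
        · subst hir
          simp [List.filter]
        · have hne : (L r == i) = false := by simp; omega
          rw [if_neg (fun h => hir h.symm)]
          simp [List.filter, hne]
    · have hset : ∀ (cl : List (List α)), cl.length ≤ L r →
          cl.set (L r) (cl.getD (L r) [] ++ [r]) = cl := by
        intro cl hcl
        exact List.set_eq_of_length_le hcl
      rw [hset _ (by simp; omega)]
      apply List.map_congr_left
      intro j hj
      simp only [List.mem_range] at hj
      rw [List.filter_append]
      have : (L r == j) = false := by simp; omega
      simp [List.filter, this]

-- filtering the zip of a list with its own map is plain filtering
theorem pvZipFilter {α β : Type} [BEq β] (lab : α → β) (j : β) :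
    ∀ (db : List α),
      (db.zip (db.map lab)).filterMap (fun rl => if rl.2 == j then some rl.1 else none)
      = db.filter (fun r => lab r == j) := by
  intro db
  induction db with
  | nil => rfl
  | cons x t ih =>
    simp only [List.map_cons, List.zip_cons_cons, List.filterMap_cons, List.filter_cons]
    by_cases h : lab x == j
    · simp [h, ih]
    · simp [h, ih]

-- ===== VERDICT (by name: the statement is the Claim_ definition above) =====
theorem GenerateClusters_spec : Claim_equal_GenerateClusters := by
  intro database centroids _ hpre
  obtain ⟨_, hc, _, _⟩ := hpre
  unfold Spec_GenerateClusters GenerateClusters GenerateClusters_alt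
  simp only []
  set d : Nat := (PySem.List.pyGetD database 0 []).length with hd
  set k : Nat := centroids.length with hk
  have hk1 : 1 ≤ k := by
    cases centroids with
    | nil => exact absurd rfl hc
    | cons c cs => simp [hk]
  -- per-record label as B computes it, and as a Nat
  have hlab : ∀ record : List Int,
      (PySem.List.min? (PySem.List.pyRange 0 (k : Int) 1)
        (fun j => pvSqB (d : Int) record (PySem.List.pyGetD centroids j []))).getD 0
      = (PySem.List.pyRange 1 (k : Int) 1).foldl
          (fun a j => if pvSqB (d : Int) record (PySem.List.pyGetD centroids j []) <
              pvSqB (d : Int) record (PySem.List.pyGetD centroids a []) then j else a) 0 := by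
    intro record
    rw [PySem.List.pyRange_one_cons (by exact_mod_cast hk1 : (0:Int) < (k : Int))]
    rw [min?_cons]
    simp
  -- A's per-record best index equals toNat of B's label
  have hbest : ∀ record : List Int,
      ((centroids.drop 1).zipIdx).foldl (fun (st : Nat × Int) ci =>
          if pvSqA (PySem.List.pyRange 0 (d : Int) 1) record ci.1 < st.2
          then (ci.2 + 1, pvSqA (PySem.List.pyRange 0 (d : Int) 1) record ci.1) else st)
        (0, pvSqA (PySem.List.pyRange 0 (d : Int) 1) record (PySem.List.pyGetD centroids 0 []))
      = ((((PySem.List.pyRange 1 (k : Int) 1).foldl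
            (fun a j => if pvSqB (d : Int) record (PySem.List.pyGetD centroids j []) <
                pvSqB (d : Int) record (PySem.List.pyGetD centroids a []) then j else a) 0).toNat),
         pvSqB (d : Int) record (PySem.List.pyGetD centroids
            (((PySem.List.pyRange 1 (k : Int) 1).foldl
            (fun a j => if pvSqB (d : Int) record (PySem.List.pyGetD centroids j []) <
                pvSqB (d : Int) record (PySem.List.pyGetD centroids a []) then j else a) 0)) [])) := by
    intro record
    have H : ∀ i, i < (centroids.drop 1).length →
        pvSqA (PySem.List.pyRange 0 (d : Int) 1) record ((centroids.drop 1).getD i [])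
        = pvSqB (d : Int) record (PySem.List.pyGetD centroids (((0:Nat) : Int) + 1 + (i : Int)) []) := by
      intro i hi
      rw [pvSq_eq]
      congr 1
      have : (((0:Nat) : Int) + 1 + (i : Int)) = (((1 + i : Nat) : Int)) := by push_cast; ring
      rw [this, PySem.List.pyGetD_natCast]
      rw [List.getD_eq_getElem?_getD, List.getD_eq_getElem?_getD, List.getElem?_drop]
    have h0 : pvSqA (PySem.List.pyRange 0 (d : Int) 1) record (PySem.List.pyGetD centroids 0 [])
        = pvSqB (d : Int) record (PySem.List.pyGetD centroids (((0:Nat)) : Int) []) := by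
      rw [pvSq_eq]; norm_num
    rw [h0]
    rw [pvBridge (fun c => pvSqA (PySem.List.pyRange 0 (d : Int) 1) record c)
      (fun j => pvSqB (d : Int) record (PySem.List.pyGetD centroids j []))
      (centroids.drop 1) 0 0 H]
    have hlen : (((0:Nat) : Int) + 1 + (((centroids.drop 1).length : Nat) : Int)) = (k : Int) := by
      simp only [List.length_drop]
      push_cast [hk]
      omega
    rw [hlen]
    norm_num
  -- name the Nat-valued label
  set LN : List Int → Nat := fun record =>
    ((PySem.List.pyRange 1 (k : Int) 1).foldl
      (fun a j => if pvSqB (d : Int) record (PySem.List.pyGetD centroids j []) <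
          pvSqB (d : Int) record (PySem.List.pyGetD centroids a []) then j else a) 0).toNat
    with hLN
  -- the Int label is nonnegative and < k, and equals (LN r : Int)
  have hlab_mem : ∀ record : List Int,
      0 ≤ (PySem.List.pyRange 1 (k : Int) 1).foldl
          (fun a j => if pvSqB (d : Int) record (PySem.List.pyGetD centroids j []) <
              pvSqB (d : Int) record (PySem.List.pyGetD centroids a []) then j else a) 0
      ∧ (PySem.List.pyRange 1 (k : Int) 1).foldl
          (fun a j => if pvSqB (d : Int) record (PySem.List.pyGetD centroids j []) <
              pvSqB (d : Int) record (PySem.List.pyGetD centroids a []) then j else a) 0 < (k : Int) := by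
    intro record
    have hmem : ∀ (l : List Int) (a : Int), (∀ x ∈ l, 0 ≤ x ∧ x < (k : Int)) → 0 ≤ a ∧ a < (k : Int) →
        0 ≤ l.foldl (fun a j => if pvSqB (d : Int) record (PySem.List.pyGetD centroids j []) <
            pvSqB (d : Int) record (PySem.List.pyGetD centroids a []) then j else a) a
        ∧ l.foldl (fun a j => if pvSqB (d : Int) record (PySem.List.pyGetD centroids j []) <
            pvSqB (d : Int) record (PySem.List.pyGetD centroids a []) then j else a) a < (k : Int) := by
      intro l
      induction l with
      | nil => intro a _ ha; simpa using ha
      | cons x t ih =>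
        intro a hl ha
        simp only [List.foldl_cons]
        by_cases h : pvSqB (d : Int) record (PySem.List.pyGetD centroids x []) <
            pvSqB (d : Int) record (PySem.List.pyGetD centroids a []) 
        · simp only [h, if_pos]
          exact ih _ (fun y hy => hl y (List.mem_cons_of_mem _ hy)) (hl x (List.mem_cons_self))
        · simp only [h, if_neg, not_false_iff]
          exact ih _ (fun y hy => hl y (List.mem_cons_of_mem _ hy)) ha
    apply hmem
    · intro x hx
      rw [PySem.List.mem_pyRange_one] at hx
      omega
    · constructor
      · omega
      · exact_mod_cast hk1
  -- rewrite A's fold as the grouping fold with LN, then apply pvGroup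
  have hA : database.foldl (fun clustersList record =>
        let st0 : Nat × Int := (0, pvSqA (PySem.List.pyRange 0 (d : Int) 1) record (PySem.List.pyGetD centroids 0 []))
        let best := ((centroids.drop 1).zipIdx).foldl (fun (st : Nat × Int) ci =>
          let dist := pvSqA (PySem.List.pyRange 0 (d : Int) 1) record ci.1
          if dist < st.2 then (ci.2 + 1, dist) else st) st0
        clustersList.set best.1 (clustersList.getD best.1 [] ++ [record]))
      ((List.range k).map (fun _ => []))
      = (List.range k).map (fun j => database.filter (fun r => LN r == j)) := by
    rw [show (fun clustersList record =>
        let st0 : Nat × Int := (0, pvSqA (PySem.List.pyRange 0 (d : Int) 1) record (PySem.List.pyGetD centroids 0 []))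
        let best := ((centroids.drop 1).zipIdx).foldl (fun (st : Nat × Int) ci =>
          let dist := pvSqA (PySem.List.pyRange 0 (d : Int) 1) record ci.1
          if dist < st.2 then (ci.2 + 1, dist) else st) st0
        clustersList.set best.1 (clustersList.getD best.1 [] ++ [record]))
      = (fun (cl : List (List (List Int))) r => cl.set (LN r) (cl.getD (LN r) [] ++ [r])) from ?_]
    · exact pvGroup k LN database
    · funext cl record
      simp only []
      rw [hbest record]
  rw [hA]
  -- B's side: zip-with-map filtering, then align the two range maps
  have hzip : ∀ j : Int,
      ((database.zip (database.map (fun record =>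
          (PySem.List.min? (PySem.List.pyRange 0 (k : Int) 1)
            (fun j' => pvSqB (d : Int) record (PySem.List.pyGetD centroids j' []))).getD 0))).filterMap
        (fun rl => if rl.2 == j then some rl.1 else none))
      = database.filter (fun r =>
          (PySem.List.min? (PySem.List.pyRange 0 (k : Int) 1)
            (fun j' => pvSqB (d : Int) r (PySem.List.pyGetD centroids j' []))).getD 0 == j) :=
    fun j => pvZipFilter _ j database
  rw [PySem.List.pyRange_zero_natCast k]
  rw [List.map_map]
  apply List.map_congr_left
  intro i hi
  simp only [Function.comp]
  rw [← PySem.List.pyRange_zero_natCast k]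
  rw [hzip ((i : Int))]
  apply List.filter_congr
  intro r _
  rw [hlab r]
  have h1 := (hlab_mem r).1
  rw [Bool.eq_iff_iff]
  simp only [hLN, beq_iff_eq]
  omega
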